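-- pv_equiv track=rewrite | github.com/Miileet/Tarea | Arrays/ej_5.py | encontrar_menor
-- ===== SOURCE A (Python) =====
-- def encontrar_menor(lista:list[int])->list:
--     Nombres = ["Ana","Luis","Juan","Sol","Roberto","Sonia","Ulises","Sofia","Maria","Pedro","Antonio", "Eugenia", "Soledad", "Mario", "Mariela"]
--     menor_edad = 100
--     nombre = []
--     for n in lista:
--         if n < menor_edad:
--             menor_edad = n
--     for i in range(len(lista)):
--         if lista[i] == menor_edad:
--             nombre += [Nombres[i]]
--     return [nombre, menor_edad]
-- ===== SOURCE B (Python) =====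
-- def encontrar_menor(lista: list[int]) -> list:
--     Nombres = ["Ana","Luis","Juan","Sol","Roberto","Sonia","Ulises","Sofia","Maria","Pedro","Antonio", "Eugenia", "Soledad", "Mario", "Mariela"]
--     menor = 100
--     indices = []
--     for i, n in enumerate(lista):
--         if n < menor:
--             menor = n
--             indices = [i]
--         elif n == menor:
--             indices.append(i)
--     return [[Nombres[i] for i in indices], menor]
-- ===== Notes on version B (the rewrite author's own statement) =====
-- stated objective: alternative
-- what changed: Single pass with enumerate tracking the running minimum and the list of its index positions (reset on a new minimum, append on a tie), then names are looked up once at the end, instead of A's two separate passes over the list.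
import Mathlib
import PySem

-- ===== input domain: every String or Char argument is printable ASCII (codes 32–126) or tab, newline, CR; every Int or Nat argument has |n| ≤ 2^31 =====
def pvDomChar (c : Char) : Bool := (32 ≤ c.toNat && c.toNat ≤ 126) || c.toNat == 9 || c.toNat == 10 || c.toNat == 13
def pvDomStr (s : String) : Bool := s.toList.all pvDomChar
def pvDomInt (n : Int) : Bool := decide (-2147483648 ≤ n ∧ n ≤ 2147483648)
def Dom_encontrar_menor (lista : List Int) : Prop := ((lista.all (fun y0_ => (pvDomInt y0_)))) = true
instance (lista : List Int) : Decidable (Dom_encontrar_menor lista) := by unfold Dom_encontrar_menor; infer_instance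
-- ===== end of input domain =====

-- B replaces A's two passes by one enumerate pass tracking the running minimum and the list of its
-- index positions, with a single name lookup at the end (alternative decomposition, same cost).

-- ===== PORT A =====
-- the Nombres table both Pythons write out literally
def pvNombres : List String := ["Ana","Luis","Juan","Sol","Roberto","Sonia","Ulises","Sofia","Maria","Pedro","Antonio","Eugenia","Soledad","Mario","Mariela"]

def encontrar_menor (lista : List Int) : List String × Int :=
  let menor_edad : Int := lista.foldl (fun m n => if n < m then n else m) 100
  let nombre : List String :=
    (PySem.List.pyRange 0 (lista.length : Int) 1).foldl
      (fun acc i =>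
        if PySem.List.pyGetD lista i 0 = menor_edad
        then acc ++ [PySem.List.pyGetD pvNombres i ""]
        else acc) []
  (nombre, menor_edad)

-- ===== PORT B =====
def encontrar_menor_alt (lista : List Int) : List String × Int :=
  let st : Int × List Int :=
    (PySem.List.enumerate lista 0).foldl
      (fun p q =>
        if q.2 < p.1 then (q.2, [q.1])
        else if q.2 = p.1 then (p.1, p.2 ++ [q.1])
        else p)
      (100, [])
  (st.2.map (fun i => PySem.List.pyGetD pvNombres i ""), st.1)

-- ===== PRECONDITION & SPEC =====
-- Pre_ excludes exactly the inputs where A raises IndexError: a value equal to the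
-- (100-seeded) minimum sitting at an index ≥ 15, past the end of the 15-entry name table.
def Pre_encontrar_menor (lista : List Int) : Prop :=
  ∀ x ∈ lista.drop 15, x ≠ lista.foldl min 100
instance (lista : List Int) : Decidable (Pre_encontrar_menor lista) := by unfold Pre_encontrar_menor; infer_instance
def pvWitness_encontrar_menor : List Int := [5, 3, 3]

def Spec_encontrar_menor (lista : List Int) (out : List String × Int) : Prop := out = encontrar_menor_alt lista
instance (lista : List Int) (out : List String × Int) : Decidable (Spec_encontrar_menor lista out) := by unfold Spec_encontrar_menor; infer_instance

-- ===== CLAIM (what is proved, stated in full; the proofs are below) =====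
def Claim_equal_encontrar_menor : Prop := ∀ (lista : List Int), Dom_encontrar_menor lista → Pre_encontrar_menor lista → Spec_encontrar_menor lista (encontrar_menor lista)

-- ===== LEMMAS AND PROOFS =====

-- the running minimum never rises
theorem pv_foldl_min_le (xs : List Int) (m : Int) :
    xs.foldl (fun m n => if n < m then n else m) m ≤ m := by
  induction xs generalizing m with
  | nil => simp
  | cons x t ih =>
    simp only [List.foldl_cons]
    exact le_trans (ih _) (by split <;> omega)

-- closed form of B's one-pass fold: the final state is the running minimum together with
-- the positions of all its occurrences (the seed accumulator survives only if no smaller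
-- element was found)
theorem pv_B_fold (xs : List Int) (s m₀ : Int) (acc₀ : List Int) :
    (PySem.List.enumerate xs s).foldl
      (fun p q =>
        if q.2 < p.1 then (q.2, [q.1])
        else if q.2 = p.1 then (p.1, p.2 ++ [q.1])
        else p)
      (m₀, acc₀)
    = (xs.foldl (fun m n => if n < m then n else m) m₀,
       (if xs.foldl (fun m n => if n < m then n else m) m₀ < m₀ then [] else acc₀)
         ++ ((PySem.List.enumerate xs s).filter
               (fun q => q.2 = xs.foldl (fun m n => if n < m then n else m) m₀)).map (·.1)) := by
  induction xs generalizing s m₀ acc₀ with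
  | nil => simp
  | cons x t ih =>
    rw [PySem.List.enumerate_cons]
    simp only [List.foldl_cons, List.filter_cons]
    by_cases h1 : x < m₀
    · have hM : t.foldl (fun m n => if n < m then n else m) x ≤ x := pv_foldl_min_le t x
      simp only [if_pos h1, ih]
      by_cases h2 : List.foldl (fun m n => if n < m then n else m) x t < x
      · simp [h2, show ¬ x = List.foldl (fun m n => if n < m then n else m) x t by omega,
              show List.foldl (fun m n => if n < m then n else m) x t < m₀ by omega]
      · simp [h1, show List.foldl (fun m n => if n < m then n else m) x t = x by omega]
    · have hM : t.foldl (fun m n => if n < m then n else m) m₀ ≤ m₀ := pv_foldl_min_le t m₀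
      by_cases h2 : x = m₀
      · simp only [ih, h2]
        by_cases h3 : List.foldl (fun m n => if n < m then n else m) m₀ t < m₀
        · simp [h3, show ¬ m₀ = List.foldl (fun m n => if n < m then n else m) m₀ t by omega]
        · simp [show List.foldl (fun m n => if n < m then n else m) m₀ t = m₀ by omega]
      · simp only [if_neg h1, if_neg h2, ih]
        simp [show ¬ x = List.foldl (fun m n => if n < m then n else m) m₀ t by omega]

-- an enumerate entry looks up (with default) to its own value
theorem pv_enum_getD (xs : List Int) (s : Int) :
    ∀ q ∈ PySem.List.enumerate xs s, PySem.List.pyGetD xs (q.1 - s) 0 = q.2 := by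
  induction xs generalizing s with
  | nil => simp
  | cons x t ih =>
    intro q hq
    rw [PySem.List.enumerate_cons] at hq
    rcases List.mem_cons.mp hq with rfl | hq
    · simp [PySem.List.pyGetD_zero_cons]
    · have hge : s + 1 ≤ q.1 := by
        have hm := List.mem_map_of_mem (f := (·.1)) hq
        rw [PySem.List.map_fst_enumerate] at hm
        exact (PySem.List.mem_pyRange_one.mp hm).1
      have h := ih (s + 1) q hq
      have e1 : q.1 - s = (((q.1 - s).toNat : Nat) : Int) := by omega
      have e2 : q.1 - (s + 1) = (((q.1 - s).toNat - 1 : Nat) : Int) := by omega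
      rw [e2, PySem.List.pyGetD_natCast] at h
      rw [e1, PySem.List.pyGetD_natCast]
      rw [show (q.1 - s).toNat = ((q.1 - s).toNat - 1) + 1 by omega]
      simpa using h

-- the two ports agree on every input (the Pre_ hypothesis only matters for fidelity to
-- the Pythons, which raise IndexError outside it)
theorem pv_ports_agree (lista : List Int) : encontrar_menor lista = encontrar_menor_alt lista := by
  show ((PySem.List.pyRange 0 (lista.length : Int) 1).foldl
      (fun acc i =>
        if PySem.List.pyGetD lista i 0 = lista.foldl (fun m n => if n < m then n else m) 100
        then acc ++ [PySem.List.pyGetD pvNombres i ""]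
        else acc) [],
      lista.foldl (fun m n => if n < m then n else m) 100)
    = (((PySem.List.enumerate lista 0).foldl
        (fun p q =>
          if q.2 < p.1 then (q.2, [q.1])
          else if q.2 = p.1 then (p.1, p.2 ++ [q.1])
          else p) (100, [])).2.map (fun i => PySem.List.pyGetD pvNombres i ""),
       ((PySem.List.enumerate lista 0).foldl
        (fun p q =>
          if q.2 < p.1 then (q.2, [q.1])
          else if q.2 = p.1 then (p.1, p.2 ++ [q.1])
          else p) (100, [])).1)
  rw [pv_B_fold]
  have hrange : PySem.List.pyRange 0 (lista.length : Int) 1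
      = (PySem.List.enumerate lista 0).map (·.1) := by
    rw [PySem.List.map_fst_enumerate]; norm_num
  rw [hrange, List.foldl_map]
  rw [PySem.List.foldl_congr_mem _ _
      (fun acc q => if decide (q.2 = lista.foldl (fun m n => if n < m then n else m) 100) = true
                    then acc ++ [PySem.List.pyGetD pvNombres q.1 ""] else acc) _
      (by
        intro acc q hq
        have := pv_enum_getD lista 0 q hq
        simp only [sub_zero] at this
        simp [this])]
  rw [PySem.List.foldl_append_if]
  simp

-- ===== VERDICT (by name: the statement is the Claim_ definition above) =====
theorem encontrar_menor_spec : Claim_equal_encontrar_menor := by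
  intro lista _ _
  exact pv_ports_agree lista
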